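-- pv_equiv track=rewrite | github.com/banana-galaxy/challenges | challenge10(timer)/solutions/hi_pika.py | lateRide
-- ===== SOURCE A (Python) =====
-- def lateRide(n):
--     hours = []
--     time = 0
--     division, remainder  = str((n // 60)), str((n % 60))
--
--     for x in range(len(division)):
--         #hours.append(int(division[x])) Gives you the divison
--         time += int(division[x])
--     for y in range(len(remainder)):
--         #hours.append(int(remainder[y])) Gives you the remainder
--         time += int(remainder[y])
--     #return hour Gives you the time, like in the example: 13:28 = [1, 3, 2, 8]
--     return time # Gives you the actual time
-- ===== SOURCE B (Python) =====
-- def lateRide(n):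
--     # Arithmetic digit sum: no string conversion; pulls digits off with % and //.
--     h, m = divmod(n, 60)
--     total = 0
--     for x in (h, m):
--         while x > 0:
--             total += x % 10
--             x //= 10
--     return total
-- ===== Notes on version B (the rewrite author's own statement) =====
-- stated objective: idiomatic
-- what changed: Replaces str() conversion and per-character int() parsing in index loops by divmod and an arithmetic while-loop that strips digits with modulus and floor division by ten.
import Mathlib
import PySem

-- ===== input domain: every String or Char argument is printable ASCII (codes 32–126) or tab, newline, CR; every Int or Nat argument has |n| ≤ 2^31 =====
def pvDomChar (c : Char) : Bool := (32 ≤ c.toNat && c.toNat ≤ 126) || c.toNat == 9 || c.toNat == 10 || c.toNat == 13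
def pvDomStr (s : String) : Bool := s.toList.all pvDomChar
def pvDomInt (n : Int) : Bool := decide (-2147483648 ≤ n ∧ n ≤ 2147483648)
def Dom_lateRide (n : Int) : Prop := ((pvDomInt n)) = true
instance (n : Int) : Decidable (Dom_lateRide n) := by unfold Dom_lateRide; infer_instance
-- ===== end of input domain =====

-- B replaces A's str() conversion and per-character int() index loops by divmod and an arithmetic digit-stripping loop (idiomatic; same cost).

-- ===== PORT A =====
-- time += int(division[x]) on one-character strings; the .getD 0 default is never reached under Pre_ (every character is a digit).
def lateRide (n : Int) : Int :=
  let division := PySem.Int.toStr (PySem.Int.floordiv n 60)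
  let remainder := PySem.Int.toStr (PySem.Int.mod n 60)
  let time : Int :=
    (PySem.List.pyRange 0 (PySem.Str.len division) 1).foldl
      (fun t x => t + ((PySem.Str.pyGet? division x).bind (fun c => PySem.Int.ofChars? [c])).getD 0) 0
  (PySem.List.pyRange 0 (PySem.Str.len remainder) 1).foldl
    (fun t y => t + ((PySem.Str.pyGet? remainder y).bind (fun c => PySem.Int.ofChars? [c])).getD 0) time

-- ===== PORT B =====
-- while x > 0: total += x % 10; x //= 10
def pvDigitLoop (x : Int) : Int :=
  if _h : 0 < x then PySem.Int.mod x 10 + pvDigitLoop (PySem.Int.floordiv x 10) else 0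
termination_by x.toNat
decreasing_by
  rw [PySem.Int.floordiv_eq_ediv_of_pos (by norm_num : (0:Int) < 10)]
  omega

def lateRide_alt (n : Int) : Int :=
  let h := PySem.Int.floordiv n 60
  let m := PySem.Int.mod n 60
  pvDigitLoop h + pvDigitLoop m

-- ===== PRECONDITION & SPEC =====
-- Pre_ excludes negative n, on which A raises ValueError: int('-') on the sign character of str(n // 60).
def Pre_lateRide (n : Int) : Prop := 0 ≤ n
instance (n : Int) : Decidable (Pre_lateRide n) := by unfold Pre_lateRide; infer_instance
def pvWitness_lateRide : Int := 754

def Spec_lateRide (n : Int) (out : Int) : Prop := out = lateRide_alt n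
instance (n : Int) (out : Int) : Decidable (Spec_lateRide n out) := by unfold Spec_lateRide; infer_instance

-- ===== CLAIM (what is proved, stated in full; the proofs are below) =====
def Claim_equal_lateRide : Prop := ∀ (n : Int), Dom_lateRide n → Pre_lateRide n → Spec_lateRide n (lateRide n)

-- ===== LEMMAS AND PROOFS =====

-- digit value of a single character, as A computes it
def pvDV (c : Char) : Int := (PySem.Int.ofChars? [c]).getD 0

-- digit sum on Nat, the reference both sides are reduced to
def pvDS (k : Nat) : Nat :=
  if k = 0 then 0 else k % 10 + pvDS (k / 10)

theorem pvDS_zero : pvDS 0 = 0 := by rw [pvDS]; rfl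

theorem pvDS_pos (k : Nat) (hk : k ≠ 0) : pvDS k = k % 10 + pvDS (k / 10) := by
  rw [pvDS, if_neg hk]

theorem pvDV_digitChar (d : Nat) (hd : d < 10) : pvDV (Nat.digitChar d) = (d : Int) := by
  interval_cases d <;> decide

theorem pvDigitLoop_natCast (k : Nat) : pvDigitLoop (k : Int) = (pvDS k : Int) := by
  induction k using Nat.strong_induction_on with
  | _ k ih =>
    rw [pvDigitLoop]
    by_cases hk : k = 0
    · simp [hk, pvDS_zero]
    · have hpos : (0:Int) < (k:Int) := by exact_mod_cast Nat.pos_of_ne_zero hk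
      rw [dif_pos hpos, PySem.Int.mod_eq_emod_of_pos (by norm_num),
        PySem.Int.floordiv_eq_ediv_of_pos (by norm_num)]
      have hdiv : (k:Int) / 10 = ((k / 10 : Nat) : Int) := by push_cast; ring
      rw [hdiv, ih (k / 10) (Nat.div_lt_self (Nat.pos_of_ne_zero hk) (by norm_num)),
        pvDS_pos k hk]
      push_cast
      ring

theorem pvToDigitsCore_sum (fuel : Nat) : ∀ (k : Nat) (acc : List Char), k < fuel →
    ((Nat.toDigitsCore 10 fuel k acc).map pvDV).sum = (pvDS k : Int) + ((acc.map pvDV).sum) := by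
  induction fuel with
  | zero => intro k acc h; omega
  | succ f ih =>
    intro k acc h
    rw [Nat.toDigitsCore]
    by_cases h0 : k / 10 = 0
    · rw [if_pos h0]
      simp only [List.map_cons, List.sum_cons]
      rw [pvDV_digitChar (k % 10) (Nat.mod_lt _ (by norm_num))]
      by_cases hz : k = 0
      · simp [hz, pvDS_zero]
      · rw [pvDS_pos k hz, h0, pvDS_zero]
        push_cast
        ring
    · rw [if_neg h0]
      have hlt : k / 10 < f := by
        have := Nat.div_lt_self (by omega : 0 < k) (by norm_num : 1 < 10)
        omega
      rw [ih (k / 10) _ hlt]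
      simp only [List.map_cons, List.sum_cons]
      rw [pvDV_digitChar (k % 10) (Nat.mod_lt _ (by norm_num)),
        pvDS_pos k (by omega)]
      push_cast
      ring

-- the index loop of A over a character list, reduced to a sum of digit values of its characters
theorem pvStrLoop (cs : List Char) (t : Int) :
    (PySem.List.pyRange 0 (cs.length : Int) 1).foldl
      (fun t x => t + ((PySem.List.pyGet? cs x).bind (fun c => PySem.Int.ofChars? [c])).getD 0) t
      = t + (cs.map pvDV).sum := by
  induction cs using List.reverseRecOn generalizing t with
  | nil => simp [PySem.List.pyRange]
  | append_singleton cs c ih =>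
    have hlen : ((cs ++ [c]).length : Int) = (cs.length : Int) + 1 := by simp
    rw [hlen, PySem.List.pyRange_one_succ_right (by positivity), List.foldl_append,
      List.foldl_cons, List.foldl_nil]
    rw [PySem.List.foldl_congr_mem (PySem.List.pyRange 0 (cs.length : Int) 1)
      (fun t x => t + ((PySem.List.pyGet? (cs ++ [c]) x).bind (fun c => PySem.Int.ofChars? [c])).getD 0)
      (fun t x => t + ((PySem.List.pyGet? cs x).bind (fun c => PySem.Int.ofChars? [c])).getD 0) t
      (by
        intro acc x hx
        rw [PySem.List.mem_pyRange_one] at hx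
        have h2 : x < (cs.length : Int) + 1 := by omega
        have hxn : x.toNat < cs.length := by omega
        simp [PySem.List.pyGet?, PySem.List.pyIdx?, hx.1, hx.2, h2,
          List.getElem?_append_left hxn])]
    rw [ih]
    have hget : PySem.List.pyGet? (cs ++ [c]) (cs.length : Int) = some c := by
      simp [PySem.List.pyGet?, PySem.List.pyIdx?]
    rw [hget]
    simp only [Option.bind_some]
    simp [pvDV]
    ring

-- one of A's two loops, over str(a) for a ≥ 0, equals t + pvDigitLoop a
theorem pvStringSum (a : Int) (ha : 0 ≤ a) (t : Int) :
    (PySem.List.pyRange 0 (PySem.Str.len (PySem.Int.toStr a)) 1).foldl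
      (fun t x => t + ((PySem.Str.pyGet? (PySem.Int.toStr a) x).bind (fun c => PySem.Int.ofChars? [c])).getD 0) t
      = t + pvDigitLoop a := by
  have htc : (PySem.Int.toStr a).toList = Nat.toDigits 10 a.toNat := by
    rw [PySem.Int.toList_toStr, PySem.Int.toChars, if_neg (by omega)]
  have hbody : ∀ (t' : Int) (x : Int),
      PySem.Str.pyGet? (PySem.Int.toStr a) x = PySem.List.pyGet? (Nat.toDigits 10 a.toNat) x := by
    intro t' x
    rw [PySem.Str.pyGet?_eq, htc]
    rfl
  rw [PySem.Str.len_eq, htc]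
  rw [PySem.List.foldl_congr_mem _
    (fun t x => t + ((PySem.Str.pyGet? (PySem.Int.toStr a) x).bind (fun c => PySem.Int.ofChars? [c])).getD 0)
    (fun t x => t + ((PySem.List.pyGet? (Nat.toDigits 10 a.toNat) x).bind (fun c => PySem.Int.ofChars? [c])).getD 0) t
    (by intro acc x _; dsimp only; rw [hbody acc x])]
  rw [pvStrLoop]
  rw [Nat.toDigits, pvToDigitsCore_sum (a.toNat + 1) a.toNat [] (by omega)]
  have hdl := pvDigitLoop_natCast a.toNat
  rw [Int.toNat_of_nonneg ha] at hdl
  rw [hdl]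
  simp

-- ===== VERDICT (by name: the statement is the Claim_ definition above) =====
theorem lateRide_spec : Claim_equal_lateRide := by
  intro n _ hpre
  unfold Spec_lateRide
  simp only [lateRide, lateRide_alt]
  have hh : 0 ≤ PySem.Int.floordiv n 60 := by
    rw [PySem.Int.floordiv_eq_ediv_of_pos (by norm_num : (0:Int) < 60)]
    exact Int.ediv_nonneg hpre (by norm_num)
  have hm : 0 ≤ PySem.Int.mod n 60 := PySem.Int.mod_nonneg n (by norm_num : (0:Int) < 60)
  rw [pvStringSum _ hh, pvStringSum _ hm]
  ring
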